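-- pv_equiv track=rewrite | github.com/98coco/cs30_fall2022 | comp sci discussions/ps10.py | noZeroListsRecurse
-- ===== SOURCE A (Python) =====
-- def noZeroListsRecurse(l):
--     if l == []:
--         return []
--     else:
--         head = l[0] #[1,2,3]
--         tail = l[1:] #[4,0,5], [], [1,1,1], [0,1,2] < -- assume this gives us [],[1,1,1]
--         if 0 in head:
--             return noZeroListsRecurse(tail)
--         else:
--             return [head] + noZeroListsRecurse(tail)
-- ===== SOURCE B (Python) =====
-- def noZeroListsRecurse(l):
--     result = []
--     for head in l:
--         if 0 not in head:
--             result.append(head)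
--     return result
-- ===== Notes on version B (the rewrite author's own statement) =====
-- stated objective: idiomatic
-- what changed: Replaces the head/tail recursion (which rebuilds the list with [head] + ... at each level) by a single iterative loop accumulating matching sublists, avoiding recursion depth and repeated list concatenation.
import Mathlib
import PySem

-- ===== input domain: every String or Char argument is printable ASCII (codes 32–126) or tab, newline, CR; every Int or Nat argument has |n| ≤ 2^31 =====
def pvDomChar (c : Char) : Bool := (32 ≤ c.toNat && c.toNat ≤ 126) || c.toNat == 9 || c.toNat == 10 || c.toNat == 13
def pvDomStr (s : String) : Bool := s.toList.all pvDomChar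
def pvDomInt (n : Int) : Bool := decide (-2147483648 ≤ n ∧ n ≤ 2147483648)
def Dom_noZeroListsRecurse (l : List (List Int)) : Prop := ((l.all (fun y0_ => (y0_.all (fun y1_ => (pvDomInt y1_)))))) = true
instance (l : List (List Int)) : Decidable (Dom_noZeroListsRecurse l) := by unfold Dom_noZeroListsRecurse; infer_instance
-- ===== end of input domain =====

-- B replaces A's head/tail recursion by an iterative accumulating loop (idiomatic; return value identical).

-- ===== PORT A =====
-- literal transliteration of A: empty check, head, tail, membership test, recurse
def noZeroListsRecurse (l : List (List Int)) : List (List Int) :=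
  match l with
  | [] => []
  | head :: tail =>
    if (0 : Int) ∈ head then
      noZeroListsRecurse tail
    else
      [head] ++ noZeroListsRecurse tail

-- ===== PORT B =====
-- literal transliteration of B: result = []; for head in l: if 0 not in head: result.append(head)
def noZeroListsRecurse_alt (l : List (List Int)) : List (List Int) :=
  l.foldl (fun result head => if (0 : Int) ∉ head then result ++ [head] else result) []

-- ===== PRECONDITION & SPEC =====
def Spec_noZeroListsRecurse (l : List (List Int)) (out : List (List Int)) : Prop := out = noZeroListsRecurse_alt l
instance (l : List (List Int)) (out : List (List Int)) : Decidable (Spec_noZeroListsRecurse l out) := by unfold Spec_noZeroListsRecurse; infer_instance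

-- ===== CLAIM (what is proved, stated in full; the proofs are below) =====
def Claim_equal_noZeroListsRecurse : Prop := ∀ (l : List (List Int)), Dom_noZeroListsRecurse l → Spec_noZeroListsRecurse l (noZeroListsRecurse l)

-- ===== LEMMAS AND PROOFS =====

-- loop invariant: folding from accumulator `acc` yields acc ++ (recursive result)
theorem alt_foldl_acc (l : List (List Int)) (acc : List (List Int)) :
    l.foldl (fun result head => if (0 : Int) ∉ head then result ++ [head] else result) acc
      = acc ++ noZeroListsRecurse l := by
  induction l generalizing acc with
  | nil => simp [noZeroListsRecurse]
  | cons head tail ih =>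
    by_cases h : (0 : Int) ∈ head
    · rw [List.foldl_cons, if_neg (by simpa using h), ih, noZeroListsRecurse, if_pos h]
    · rw [List.foldl_cons, if_pos (by simpa using h), ih, noZeroListsRecurse, if_neg h,
        List.append_assoc]

-- ===== VERDICT (by name: the statement is the Claim_ definition above) =====
theorem noZeroListsRecurse_spec : Claim_equal_noZeroListsRecurse := by
  intro l _
  unfold Spec_noZeroListsRecurse noZeroListsRecurse_alt
  simpa using (alt_foldl_acc l []).symm
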